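-- pv_equiv track=rewrite | github.com/parshuramreddysudda/InterviewPreparation | LeetCode Problems/src/Medium/generateParenthesis.py | max_equal_cost_packages
-- ===== SOURCE A (Python) =====
-- from collections import Counter
--
-- def max_equal_cost_packages(itemCosts):
--     freq = Counter(itemCosts)
--     max_cost = max(itemCosts)
--     max_packages = 0
--
--     # Try every possible target cost
--     for target in range(1, 2 * max_cost + 1):
--         temp = freq.copy()
--         packages = 0
--
--         for cost in list(temp.keys()):
--             other = target - cost
--             if other not in temp:
--                 continue
--
--             if cost == other:
--                 # Only pairs of identical items
--                 packages += temp[cost] // 2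
--                 temp[cost] = 0
--             elif cost < other:
--                 # Pair different items
--                 pairs = min(temp[cost], temp[other])
--                 packages += pairs
--                 temp[cost] -= pairs
--                 temp[other] -= pairs
--
--         # Finally, add single items that directly equal target
--         if target in temp:
--             packages += temp[target]
--
--         max_packages = max(max_packages, packages)
--
--     return max_packages
-- ===== SOURCE B (Python) =====
-- from collections import Counter
--
-- def max_equal_cost_packages(itemCosts):
--     freq = Counter(itemCosts)
--     # scatter every possible contribution into a score table, one pass over
--     # the distinct costs and one pass over unordered pairs of distinct costs
--     score = Counter()
--     for t, ft in freq.items():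
--         if t >= 1:
--             score[t] += ft            # single items of cost t
--             score[2 * t] += ft // 2   # pairs of two identical items
--     rest = sorted(c for c in freq if c != 0)
--     while rest:
--         c = rest.pop(0)
--         fc = freq[c]
--         for d in rest:
--             if c + d >= 1:
--                 score[c + d] += min(fc, freq[d])
--     return max(score.values(), default=0)
-- ===== Notes on version B (the rewrite author's own statement) =====
-- stated objective: faster
-- what changed: Instead of scanning every target in range(1, 2*max+1) and replaying a mutated Counter copy per target, B makes one pass over the distinct costs and one pass over unordered pairs of distinct costs, scattering each contribution (single, identical pair, mixed pair) into a score table, and returns the table's maximum.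
import Mathlib
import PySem

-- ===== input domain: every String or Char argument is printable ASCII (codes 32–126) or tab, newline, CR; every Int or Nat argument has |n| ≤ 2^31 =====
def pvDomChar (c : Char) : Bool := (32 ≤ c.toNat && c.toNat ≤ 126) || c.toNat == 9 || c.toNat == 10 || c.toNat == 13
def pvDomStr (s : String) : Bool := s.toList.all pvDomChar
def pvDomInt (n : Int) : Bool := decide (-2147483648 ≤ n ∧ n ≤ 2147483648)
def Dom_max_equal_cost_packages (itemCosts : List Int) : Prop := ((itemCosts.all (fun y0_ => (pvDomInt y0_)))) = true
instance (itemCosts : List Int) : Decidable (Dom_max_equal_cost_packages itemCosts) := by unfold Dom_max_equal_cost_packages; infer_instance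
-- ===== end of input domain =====

-- B replaces A's scan of every target in range(1, 2*max+1) (with a mutated Counter copy per
-- target) by one pass over the distinct costs and one pass over their unordered pairs,
-- scattering each contribution into a score table (measured faster in a timing run).

-- ===== PORT A =====
-- inner 'for cost in list(temp.keys())' loop body of A; state = (temp, packages)
def aStep (target : Int) (st : PySem.Dict Int Int × Int) (cost : Int) : PySem.Dict Int Int × Int :=
  let other := target - cost
  if st.1.contains other = false then st
  else if cost = other then
    (st.1.insert cost 0, st.2 + PySem.Int.floordiv (st.1.getD cost 0) 2)
  else if cost < other then
    let pairs := min (st.1.getD cost 0) (st.1.getD other 0)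
    ((st.1.insert cost (st.1.getD cost 0 - pairs)).insert other (st.1.getD other 0 - pairs),
     st.2 + pairs)
  else st

-- one iteration of A's outer 'for target in range(...)' loop: the packages count for one target
def aTarget (freq : PySem.Dict Int Int) (target : Int) : Int :=
  let st := freq.keys.foldl (aStep target) (freq, 0)
  if st.1.contains target then st.2 + st.1.getD target 0 else st.2

def max_equal_cost_packages (itemCosts : List Int) : Int :=
  let freq := PySem.Dict.counter itemCosts
  let max_cost := (PySem.List.max? itemCosts (fun x => x)).getD 0  -- max() raises on []: excluded by Pre_
  (PySem.List.pyRange 1 (2 * max_cost + 1)).foldl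
    (fun max_packages target => max max_packages (aTarget freq target)) 0

-- ===== PORT B =====
-- the 'while rest: c = rest.pop(0); for d in rest: ...' pair loop of B
def bPairs (freq : PySem.Dict Int Int) : List Int → PySem.Dict Int Int → PySem.Dict Int Int
  | [], score => score
  | c :: rest, score =>
    bPairs freq rest (rest.foldl
      (fun sc d => if 1 ≤ c + d then
          sc.modify (c + d) 0 (· + min (freq.getD c 0) (freq.getD d 0))
        else sc) score)

def max_equal_cost_packages_alt (itemCosts : List Int) : Int :=
  let freq := PySem.Dict.counter itemCosts
  let score := freq.items.foldl
    (fun sc p => if 1 ≤ p.1 then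
        (sc.modify p.1 0 (· + p.2)).modify (2 * p.1) 0 (· + PySem.Int.floordiv p.2 2)
      else sc) PySem.Dict.empty
  let rest := PySem.List.sorted (freq.keys.filter (fun c => decide (c ≠ 0))) (fun x => x) false
  let score := bPairs freq rest score
  PySem.List.maxD score.values (fun x => x) 0

-- ===== PRECONDITION & SPEC =====
-- Pre_ excludes only the empty list, on which A's max(itemCosts) raises ValueError.
def Pre_max_equal_cost_packages (itemCosts : List Int) : Prop := itemCosts ≠ []
instance (itemCosts : List Int) : Decidable (Pre_max_equal_cost_packages itemCosts) := by
  unfold Pre_max_equal_cost_packages; infer_instance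
def pvWitness_max_equal_cost_packages : List Int := [1, 2, 1, 3]

def Spec_max_equal_cost_packages (itemCosts : List Int) (out : Int) : Prop :=
  out = max_equal_cost_packages_alt itemCosts
instance (itemCosts : List Int) (out : Int) : Decidable (Spec_max_equal_cost_packages itemCosts out) := by
  unfold Spec_max_equal_cost_packages; infer_instance

-- ===== CLAIM (what is proved, stated in full; the proofs are below) =====
def Claim_equal_max_equal_cost_packages : Prop := ∀ (itemCosts : List Int),
  Dom_max_equal_cost_packages itemCosts → Pre_max_equal_cost_packages itemCosts →
  Spec_max_equal_cost_packages itemCosts (max_equal_cost_packages itemCosts)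

-- ===== LEMMAS AND PROOFS =====

-- the per-target score A's target loop computes (proof-side characterisation)
def bCount (freq : PySem.Dict Int Int) (costs : List Int) (t : Int) : Int :=
  let count := freq.getD t 0
  let count := if PySem.Int.mod t 2 = 0 ∧ freq.contains (PySem.Int.floordiv t 2) = true then
      count + PySem.Int.floordiv (freq.getD (PySem.Int.floordiv t 2) 0) 2
    else count
  count + ((costs.filter (fun c => decide (c ≠ 0 ∧ 2 * c < t) && freq.contains (t - c))).map
      (fun c => min (freq.getD c 0) (freq.getD (t - c) 0))).sum


-- net contribution of key c to A's count for target t (package increments minus what the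
-- pairing takes away from the final temp[target] read)
def netc (fr : PySem.Dict Int Int) (t c : Int) : Int :=
  if fr.contains (t - c) = true then
    (if 2 * c = t then PySem.Int.floordiv (fr.getD c 0) 2
     else if 2 * c < t ∧ c ≠ 0 then min (fr.getD c 0) (fr.getD (t - c) 0)
     else 0)
  else 0

lemma aStep_skip {t c : Int} {st : PySem.Dict Int Int × Int}
    (h : st.1.contains (t - c) = false) : aStep t st c = st := by
  unfold aStep; dsimp only; rw [h, if_pos rfl]

lemma aStep_eq {t c : Int} {st : PySem.Dict Int Int × Int}
    (h : st.1.contains (t - c) = true) (he : c = t - c) :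
    aStep t st c = (st.1.insert c 0, st.2 + PySem.Int.floordiv (st.1.getD c 0) 2) := by
  unfold aStep; dsimp only; rw [h, if_neg (by simp), if_pos he]

lemma aStep_lt {t c : Int} {st : PySem.Dict Int Int × Int}
    (h : st.1.contains (t - c) = true) (hne : c ≠ t - c) (hlt : c < t - c) :
    aStep t st c =
      ((st.1.insert c (st.1.getD c 0 - min (st.1.getD c 0) (st.1.getD (t - c) 0))).insert (t - c)
        (st.1.getD (t - c) 0 - min (st.1.getD c 0) (st.1.getD (t - c) 0)),
       st.2 + min (st.1.getD c 0) (st.1.getD (t - c) 0)) := by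
  unfold aStep; dsimp only; rw [h, if_neg (by simp), if_neg hne, if_pos hlt]

lemma aStep_gt {t c : Int} {st : PySem.Dict Int Int × Int}
    (h : st.1.contains (t - c) = true) (hne : c ≠ t - c) (hge : ¬ c < t - c) :
    aStep t st c = st := by
  unfold aStep; dsimp only; rw [h, if_neg (by simp), if_neg hne, if_neg hge]

lemma innerR (t : Int) (fr : PySem.Dict Int Int) :
    ∀ (K : List Int) (temp : PySem.Dict Int Int) (p : Int),
    1 ≤ t → K.Nodup →
    (∀ x, temp.contains x = fr.contains x) →
    (∀ x ∈ K, temp.contains x = true) →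
    (∀ x ∈ K, (2 * x ≤ t → temp.getD x 0 = fr.getD x 0) ∧
              (2 * x < t → temp.getD (t - x) 0 = fr.getD (t - x) 0)) →
    (if (K.foldl (aStep t) (temp, p)).1.contains t = true then
       (K.foldl (aStep t) (temp, p)).2 + (K.foldl (aStep t) (temp, p)).1.getD t 0
     else (K.foldl (aStep t) (temp, p)).2) =
    (if temp.contains t = true then p + temp.getD t 0 else p) + (K.map (netc fr t)).sum := by
  intro K
  induction K with
  | nil => intro temp p ht _ _ _ _; simp
  | cons c K ih =>
    intro temp p ht hnd hcont hkeys hyp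
    have hcK : c ∉ K := (List.nodup_cons.mp hnd).1
    have hndK : K.Nodup := (List.nodup_cons.mp hnd).2
    have hkc : temp.contains c = true := hkeys c (List.mem_cons_self ..)
    have hfrc : fr.contains c = true := by rw [← hcont]; exact hkc
    simp only [List.foldl_cons, List.map_cons, List.sum_cons]
    by_cases hco : temp.contains (t - c) = true
    · have hfro : fr.contains (t - c) = true := by rw [← hcont]; exact hco
      by_cases he : c = t - c
      · -- identical pair: packages += temp[c] // 2; temp[c] = 0
        have h2c : 2 * c = t := by omega
        have htc : t ≠ c := by omega
        rw [aStep_eq hco he]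
        have hgc : temp.getD c 0 = fr.getD c 0 := (hyp c (List.mem_cons_self ..)).1 (by omega)
        set temp' := temp.insert c 0 with htemp'
        have hcont' : ∀ x, temp'.contains x = fr.contains x := by
          intro x
          rw [htemp', PySem.Dict.contains_insert, hcont x]
          by_cases hx : x = c
          · simp [hx, hfrc]
          · simp [hx]
        have hkeys' : ∀ x ∈ K, temp'.contains x = true := by
          intro x hx
          rw [htemp', PySem.Dict.contains_insert, hkeys x (List.mem_cons_of_mem _ hx)]
          simp
        have hyp' : ∀ x ∈ K, (2 * x ≤ t → temp'.getD x 0 = fr.getD x 0) ∧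
            (2 * x < t → temp'.getD (t - x) 0 = fr.getD (t - x) 0) := by
          intro x hx
          have hxc : x ≠ c := fun hh => hcK (hh ▸ hx)
          have htxc : t - x ≠ c := by intro hh; apply hxc; omega
          rw [htemp', PySem.Dict.getD_insert, PySem.Dict.getD_insert, if_neg hxc, if_neg htxc]
          exact hyp x (List.mem_cons_of_mem _ hx)
        have hnetc : netc fr t c = PySem.Int.floordiv (fr.getD c 0) 2 := by
          rw [netc, if_pos hfro, if_pos h2c]
        have hgt' : temp'.getD t 0 = temp.getD t 0 := by
          rw [htemp', PySem.Dict.getD_insert, if_neg htc]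
        rw [ih temp' (p + PySem.Int.floordiv (temp.getD c 0) 2) ht hndK hcont' hkeys' hyp',
            hcont' t, hcont t, hgt', hnetc, hgc]
        split_ifs <;> ring
      · by_cases hlt : c < t - c
        · -- pair of different costs
          have h2c : 2 * c < t := by omega
          have hgc : temp.getD c 0 = fr.getD c 0 := (hyp c (List.mem_cons_self ..)).1 (by omega)
          have hgo : temp.getD (t - c) 0 = fr.getD (t - c) 0 :=
            (hyp c (List.mem_cons_self ..)).2 h2c
          rw [aStep_lt hco he hlt]
          set P := min (temp.getD c 0) (temp.getD (t - c) 0) with hP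
          set temp' := (temp.insert c (temp.getD c 0 - P)).insert (t - c)
            (temp.getD (t - c) 0 - P) with htemp'
          have hcont' : ∀ x, temp'.contains x = fr.contains x := by
            intro x
            rw [htemp', PySem.Dict.contains_insert, PySem.Dict.contains_insert, hcont x]
            by_cases hx1 : x = t - c
            · simp [hx1, hfro]
            · by_cases hx2 : x = c
              · simp [hx2, hfrc]
              · rw [beq_eq_false_iff_ne.mpr hx1, beq_eq_false_iff_ne.mpr hx2]
                simp
          have hkeys' : ∀ x ∈ K, temp'.contains x = true := by
            intro x hx
            rw [htemp', PySem.Dict.contains_insert, PySem.Dict.contains_insert,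
                hkeys x (List.mem_cons_of_mem _ hx)]
            simp
          have hyp' : ∀ x ∈ K, (2 * x ≤ t → temp'.getD x 0 = fr.getD x 0) ∧
              (2 * x < t → temp'.getD (t - x) 0 = fr.getD (t - x) 0) := by
            intro x hx
            have hxc : x ≠ c := fun hh => hcK (hh ▸ hx)
            constructor
            · intro hxle
              have hx1 : x ≠ t - c := by omega
              rw [htemp', PySem.Dict.getD_insert, PySem.Dict.getD_insert, if_neg hx1, if_neg hxc]
              exact (hyp x (List.mem_cons_of_mem _ hx)).1 hxle
            · intro hxlt
              have hx1 : t - x ≠ t - c := by intro hh; apply hxc; omega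
              have hx2 : t - x ≠ c := by omega
              rw [htemp', PySem.Dict.getD_insert, PySem.Dict.getD_insert, if_neg hx1, if_neg hx2]
              exact (hyp x (List.mem_cons_of_mem _ hx)).2 hxlt
          have hih := ih temp' (p + P) ht hndK hcont' hkeys' hyp'
          by_cases hc0 : c = 0
          · -- pairing with 0-cost items: net contribution 0
            subst hc0
            have htt : t - 0 = t := by ring
            have hct : fr.contains t = true := by rw [← htt]; exact hfro
            have hgt : temp.getD t 0 = fr.getD t 0 := by rw [← htt]; exact hgo
            have hgt' : temp'.getD t 0 = temp.getD t 0 - P := by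
              rw [htemp', PySem.Dict.getD_insert, if_pos htt.symm, htt]
            have hnetc : netc fr t 0 = 0 := by
              rw [netc, htt, if_pos hct, if_neg (by omega : ¬ 2 * (0:Int) = t),
                  if_neg (by simp : ¬ (2 * (0:Int) < t ∧ (0:Int) ≠ 0))]
            rw [hih, hcont' t, hct, hcont t, hct, if_pos rfl, if_pos rfl, hgt', hgt, hnetc]
            ring
          · -- ordinary pair: contributes min of the two counts
            have ht1 : t ≠ c := by omega
            have ht2 : t ≠ t - c := by omega
            have hgt' : temp'.getD t 0 = temp.getD t 0 := by
              rw [htemp', PySem.Dict.getD_insert, PySem.Dict.getD_insert, if_neg ht2, if_neg ht1]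
            have hcc : 2 * c < t ∧ c ≠ 0 := ⟨h2c, hc0⟩
            have hnetc : netc fr t c = min (fr.getD c 0) (fr.getD (t - c) 0) := by
              rw [netc, if_pos hfro, if_neg (by omega : ¬ 2 * c = t), if_pos hcc]
            rw [hih, hcont' t, hcont t, hgt', hnetc, hP, hgc, hgo]
            split_ifs <;> ring
        · -- cost > other: nothing happens
          rw [aStep_gt hco he hlt]
          have hnetc : netc fr t c = 0 := by
            rw [netc, if_pos hfro, if_neg (by omega : ¬ 2 * c = t),
                if_neg (by rw [not_and_or]; left; omega)]
          rw [ih temp p ht hndK hcont (fun x hx => hkeys x (List.mem_cons_of_mem _ hx))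
              (fun x hx => hyp x (List.mem_cons_of_mem _ hx)), hnetc]
          ring
    · -- other not present: nothing happens
      have hco2 : temp.contains (t - c) = false := by simpa using hco
      have hfro : fr.contains (t - c) = false := by rw [← hcont]; exact hco2
      rw [aStep_skip hco2]
      have hnetc : netc fr t c = 0 := by rw [netc, if_neg (by simp [hfro])]
      rw [ih temp p ht hndK hcont (fun x hx => hkeys x (List.mem_cons_of_mem _ hx))
          (fun x hx => hyp x (List.mem_cons_of_mem _ hx)), hnetc]
      ring

def hpart (fr : PySem.Dict Int Int) (t c : Int) : Int :=
  if 2 * c = t ∧ fr.contains (t - c) = true then PySem.Int.floordiv (fr.getD c 0) 2 else 0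

def mpart (fr : PySem.Dict Int Int) (t c : Int) : Int :=
  if (c ≠ 0 ∧ 2 * c < t) ∧ fr.contains (t - c) = true then
    min (fr.getD c 0) (fr.getD (t - c) 0) else 0

lemma netc_eq (fr : PySem.Dict Int Int) (t c : Int) :
    netc fr t c = hpart fr t c + mpart fr t c := by
  unfold netc hpart mpart
  split_ifs <;> first | omega | simp_all

lemma sum_map_single (a : Int) (g : Int → Int) :
    ∀ (K : List Int), K.Nodup →
    (K.map (fun c => if c = a then g c else 0)).sum = if a ∈ K then g a else 0 := by
  intro K
  induction K with
  | nil => simp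
  | cons c K ih =>
    intro hnd
    simp only [List.map_cons, List.sum_cons, ih (List.nodup_cons.mp hnd).2]
    by_cases hc : c = a
    · have haK : a ∉ K := hc ▸ (List.nodup_cons.mp hnd).1
      simp [hc, haK]
    · simp [hc, List.mem_cons, Ne.symm hc]

lemma sum_map_if_filter (p : Int → Bool) (v : Int → Int) :
    ∀ (K : List Int),
    (K.map (fun c => if p c = true then v c else 0)).sum = ((K.filter p).map v).sum := by
  intro K
  induction K with
  | nil => simp
  | cons c K ih => cases hp : p c <;> simp [hp, ih]

lemma sum_hpart (fr : PySem.Dict Int Int) (t : Int) (K : List Int)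
    (hnd : K.Nodup) (hmem : ∀ x, x ∈ K ↔ fr.contains x = true) :
    (K.map (hpart fr t)).sum =
    if PySem.Int.mod t 2 = 0 ∧ fr.contains (PySem.Int.floordiv t 2) = true then
      PySem.Int.floordiv (fr.getD (PySem.Int.floordiv t 2) 0) 2
    else 0 := by
  by_cases hdvd : (2:Int) ∣ t
  · obtain ⟨k, hk⟩ := hdvd
    have hfd : PySem.Int.floordiv t 2 = k := by
      rw [PySem.Int.floordiv_eq_ediv_of_pos (by norm_num), hk]
      omega
    have hmod : PySem.Int.mod t 2 = 0 := (PySem.Int.mod_eq_zero_iff_dvd t 2).mpr ⟨k, hk⟩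
    have hpw : ∀ c, hpart fr t c =
        (fun c => if c = k then (if fr.contains (t - c) = true then
          PySem.Int.floordiv (fr.getD c 0) 2 else 0) else 0) c := by
      intro c
      simp only [hpart]
      split_ifs <;> first | rfl | omega | simp_all
    rw [List.map_congr_left (fun c _ => hpw c), sum_map_single k _ K hnd, hfd, hmod]
    have htk : t - k = k := by omega
    by_cases hck : fr.contains k = true
    · simp [hck, (hmem k).mpr hck, htk]
    · have : k ∉ K := fun hh => hck ((hmem k).mp hh)
      simp [hck, this]
  · have hmod : ¬ PySem.Int.mod t 2 = 0 := fun hh => hdvd ((PySem.Int.mod_eq_zero_iff_dvd t 2).mp hh)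
    rw [if_neg (fun hh => hmod hh.1)]
    apply List.sum_eq_zero
    intro x hx
    obtain ⟨c, _, rfl⟩ := List.mem_map.mp hx
    simp only [hpart]
    rw [if_neg (fun hh => hdvd ⟨c, by omega⟩)]

lemma sum_mpart (fr : PySem.Dict Int Int) (t : Int) (K : List Int) :
    (K.map (mpart fr t)).sum =
    ((K.filter (fun c => decide (c ≠ 0 ∧ 2 * c < t) && fr.contains (t - c))).map
      (fun c => min (fr.getD c 0) (fr.getD (t - c) 0))).sum := by
  rw [← sum_map_if_filter]
  apply congrArg
  apply List.map_congr_left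
  intro c _
  simp only [mpart, Bool.and_eq_true, decide_eq_true_eq]

lemma aTarget_eq_bCount (xs : List Int) (t : Int) (ht : 1 ≤ t) :
    aTarget (PySem.Dict.counter xs) t =
    bCount (PySem.Dict.counter xs) (PySem.Dict.counter xs).keys t := by
  set fr := PySem.Dict.counter xs with hfr
  have hnd : fr.keys.Nodup := PySem.Dict.nodup_keys_counter xs
  have h1 := innerR t fr fr.keys fr 0 ht hnd (fun _ => rfl)
    (fun x hx => (PySem.Dict.contains_iff_mem_keys fr x).mpr hx)
    (fun x _ => ⟨fun _ => rfl, fun _ => rfl⟩)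
  unfold aTarget
  rw [h1]
  have h2 : (fr.keys.map (netc fr t)).sum =
      (fr.keys.map (hpart fr t)).sum + (fr.keys.map (mpart fr t)).sum := by
    rw [← List.sum_map_add]
    exact congrArg _ (List.map_congr_left (fun c _ => netc_eq fr t c))
  rw [h2, sum_hpart fr t fr.keys hnd
        (fun x => (PySem.Dict.contains_iff_mem_keys fr x).symm),
      sum_mpart fr t fr.keys]
  unfold bCount
  have hsingle : (if fr.contains t = true then 0 + fr.getD t 0 else (0:Int)) = fr.getD t 0 := by
    cases hb : fr.contains t
    · rw [PySem.Dict.getD_of_not_contains fr 0 hb]; simp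
    · simp
  rw [hsingle]
  split_ifs <;> ring

lemma bCount_decomp (fr : PySem.Dict Int Int) (K : List Int) (t : Int) :
    bCount fr K t = fr.getD t 0 +
      (if PySem.Int.mod t 2 = 0 ∧ fr.contains (PySem.Int.floordiv t 2) = true then
        PySem.Int.floordiv (fr.getD (PySem.Int.floordiv t 2) 0) 2 else 0) +
      ((K.filter (fun c => decide (c ≠ 0 ∧ 2 * c < t) && fr.contains (t - c))).map
        (fun c => min (fr.getD c 0) (fr.getD (t - c) 0))).sum := by
  unfold bCount
  split_ifs <;> ring

lemma foldl_max_le_of (g : Int → Int) (M : Int) :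
    ∀ (L : List Int) (a : Int), a ≤ M → (∀ x ∈ L, g x ≤ M) →
    L.foldl (fun acc x => max acc (g x)) a ≤ M := by
  intro L
  induction L with
  | nil => intro a ha _; simpa using ha
  | cons c L ih =>
    intro a ha hL
    simp only [List.foldl_cons]
    exact ih _ (max_le ha (hL c (List.mem_cons_self ..)))
      (fun x hx => hL x (List.mem_cons_of_mem _ hx))

-- ===== B-side characterisation =====

-- phase 1 (the singles / identical-pairs scatter loop), additively per slot s
lemma phase1_getD :
    ∀ (ps : List (Int × Int)) (sc : PySem.Dict Int Int) (s : Int),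
    (ps.foldl (fun sc p => if 1 ≤ p.1 then
        (sc.modify p.1 0 (· + p.2)).modify (2 * p.1) 0 (· + PySem.Int.floordiv p.2 2)
      else sc) sc).getD s 0 =
    sc.getD s 0
      + ((ps.filter (fun p => decide (1 ≤ p.1) && decide (p.1 = s))).map (fun p => p.2)).sum
      + ((ps.filter (fun p => decide (1 ≤ p.1) && decide (2 * p.1 = s))).map
          (fun p => PySem.Int.floordiv p.2 2)).sum := by
  intro ps
  induction ps with
  | nil => simp
  | cons p ps ih =>
    intro sc s
    simp only [List.foldl_cons, List.filter_cons]
    by_cases h1 : 1 ≤ p.1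
    · have hgd : ((sc.modify p.1 0 (· + p.2)).modify (2 * p.1) 0
          (· + PySem.Int.floordiv p.2 2)).getD s 0 =
          sc.getD s 0 + (if p.1 = s then p.2 else 0)
            + (if 2 * p.1 = s then PySem.Int.floordiv p.2 2 else 0) := by
        simp only [PySem.Dict.getD_modify]
        by_cases hs2 : s = 2 * p.1 <;> by_cases hs1 : s = p.1
        · omega
        · rw [if_pos hs2, if_neg (by omega : ¬ (2 * p.1 = p.1)),
              if_neg (by omega : ¬ p.1 = s), if_pos (by omega : 2 * p.1 = s)]
          subst hs2; ring
        · rw [if_neg hs2, if_pos hs1, if_pos (by omega : p.1 = s),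
              if_neg (by omega : ¬ 2 * p.1 = s)]
          subst hs1; ring
        · rw [if_neg hs2, if_neg hs1, if_neg (by omega : ¬ p.1 = s),
              if_neg (by omega : ¬ 2 * p.1 = s)]
          ring
      rw [if_pos h1, ih _ s, hgd, decide_eq_true h1]
      by_cases hp1 : p.1 = s <;> by_cases hp2 : 2 * p.1 = s
      · omega
      · rw [if_pos hp1, if_neg hp2,
            if_pos (by simp [hp1] : (true && decide (p.1 = s)) = true),
            if_neg (by simp [hp2] : ¬ (true && decide (2 * p.1 = s)) = true)]
        simp only [List.map_cons, List.sum_cons]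
        ring
      · rw [if_neg hp1, if_pos hp2,
            if_neg (by simp [hp1] : ¬ (true && decide (p.1 = s)) = true),
            if_pos (by simp [hp2] : (true && decide (2 * p.1 = s)) = true)]
        simp only [List.map_cons, List.sum_cons]
        ring
      · rw [if_neg hp1, if_neg hp2,
            if_neg (by simp [hp1] : ¬ (true && decide (p.1 = s)) = true),
            if_neg (by simp [hp2] : ¬ (true && decide (2 * p.1 = s)) = true)]
        ring
    · rw [if_neg h1, ih _ s, decide_eq_false h1]
      simp

-- the inner 'for d in rest' loop of one pair-phase step, at slot s
lemma pairStep_getD (freq : PySem.Dict Int Int) (c : Int) :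
    ∀ (rest : List Int) (sc : PySem.Dict Int Int) (s : Int), rest.Nodup →
    (rest.foldl (fun sc d => if 1 ≤ c + d then
        sc.modify (c + d) 0 (· + min (freq.getD c 0) (freq.getD d 0))
      else sc) sc).getD s 0 =
    sc.getD s 0 + (if (s - c) ∈ rest ∧ 1 ≤ s then
        min (freq.getD c 0) (freq.getD (s - c) 0) else 0) := by
  intro rest
  induction rest with
  | nil => intro sc s _; simp
  | cons d rest ih =>
    intro sc s hnd
    have hdR : d ∉ rest := (List.nodup_cons.mp hnd).1
    have hndR : rest.Nodup := (List.nodup_cons.mp hnd).2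
    simp only [List.foldl_cons]
    by_cases hd : d = s - c
    · by_cases hge : 1 ≤ c + d
      · rw [if_pos hge, ih _ s hndR,
            if_neg (fun hh => hdR (hd ▸ hh.1)),
            PySem.Dict.getD_modify, if_pos (by omega : s = c + d),
            if_pos ⟨by rw [← hd]; exact List.mem_cons_self .., by omega⟩, hd]
        ring
      · rw [if_neg hge, ih _ s hndR, if_neg (fun hh => hdR (hd ▸ hh.1))]
        have : ¬ ((s - c) ∈ d :: rest ∧ 1 ≤ s) := fun hh => hge (by omega)
        rw [if_neg this]
    · have hkey : ∀ sc' : PySem.Dict Int Int,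
          (if 1 ≤ c + d then
            sc'.modify (c + d) 0 (· + min (freq.getD c 0) (freq.getD d 0)) else sc').getD s 0
          = sc'.getD s 0 := by
        intro sc'
        split_ifs with hge
        · rw [PySem.Dict.getD_modify, if_neg (by omega : ¬ s = c + d)]
        · rfl
      rw [ih _ s hndR]
      have hmem : ((s - c) ∈ rest ∧ 1 ≤ s) ↔ ((s - c) ∈ d :: rest ∧ 1 ≤ s) := by
        constructor
        · exact fun hh => ⟨List.mem_cons_of_mem _ hh.1, hh.2⟩
        · rintro ⟨hh, h2⟩
          rcases List.mem_cons.mp hh with h | h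
          · exact absurd h.symm hd
          · exact ⟨h, h2⟩
      rw [hkey sc]
      split_ifs with ha hb hb
      · rfl
      · exact absurd (hmem.mp ha) hb
      · exact absurd (hmem.mpr hb) ha
      · rfl

-- the pair phase over a strictly increasing, upward-closed list of nonzero keys
lemma bPairs_getD (freq : PySem.Dict Int Int) (s : Int) (hs : 1 ≤ s) :
    ∀ (L : List Int) (sc : PySem.Dict Int Int),
    L.Nodup → L.Pairwise (· < ·) →
    (∀ x ∈ L, freq.contains x = true ∧ x ≠ 0) →
    (∀ c ∈ L, ∀ x, freq.contains x = true → x ≠ 0 → c < x → x ∈ L) →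
    (bPairs freq L sc).getD s 0 =
    sc.getD s 0 + ((L.filter (fun c => decide (c ≠ 0 ∧ 2 * c < s) && freq.contains (s - c))).map
        (fun c => min (freq.getD c 0) (freq.getD (s - c) 0))).sum := by
  intro L
  induction L with
  | nil => intro sc _ _ _ _; simp [bPairs]
  | cons c rest ih =>
    intro sc hnd hpw hsub hcl
    have hndR : rest.Nodup := (List.nodup_cons.mp hnd).2
    have hcR : c ∉ rest := (List.nodup_cons.mp hnd).1
    have hpwh : ∀ x ∈ rest, c < x := (List.pairwise_cons.mp hpw).1
    have hpwR : rest.Pairwise (· < ·) := (List.pairwise_cons.mp hpw).2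
    have hsubR : ∀ x ∈ rest, freq.contains x = true ∧ x ≠ 0 :=
      fun x hx => hsub x (List.mem_cons_of_mem _ hx)
    have hclR : ∀ c' ∈ rest, ∀ x, freq.contains x = true → x ≠ 0 → c' < x → x ∈ rest := by
      intro c' hc' x hx hx0 hlt
      rcases List.mem_cons.mp
          (hcl c' (List.mem_cons_of_mem _ hc') x hx hx0 hlt) with rfl | h
      · exact absurd (lt_trans (hpwh c' hc') hlt) (lt_irrefl x)
      · exact h
    show (bPairs freq rest _).getD s 0 = _
    rw [ih _ hndR hpwR hsubR hclR, pairStep_getD freq c rest sc s hndR]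
    have hiff : ((s - c) ∈ rest ∧ 1 ≤ s) ↔
        (decide (c ≠ 0 ∧ 2 * c < s) && freq.contains (s - c)) = true := by
      rw [Bool.and_eq_true, decide_eq_true_eq]
      constructor
      · rintro ⟨hm, _⟩
        exact ⟨⟨(hsub c (List.mem_cons_self ..)).2, by have := hpwh _ hm; omega⟩,
          (hsubR _ hm).1⟩
      · rintro ⟨⟨hc0, hlt⟩, hcon⟩
        have hsc0 : s - c ≠ 0 := by omega
        have := hcl c (List.mem_cons_self ..) (s - c) hcon hsc0 (by omega)
        rcases List.mem_cons.mp this with h | h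
        · omega
        · exact ⟨h, hs⟩
    rw [List.filter_cons]
    by_cases hcond : (decide (c ≠ 0 ∧ 2 * c < s) && freq.contains (s - c)) = true
    · rw [if_pos hcond, if_pos (hiff.mpr hcond)]
      simp only [List.map_cons, List.sum_cons]
      ring
    · rw [if_neg hcond, if_neg (fun hh => hcond (hiff.mp hh))]
      ring

-- keys stay inside [1, 2*M] through every phase
lemma phase1_keys (M : Int) :
    ∀ (ps : List (Int × Int)) (sc : PySem.Dict Int Int),
    (∀ k ∈ sc.keys, 1 ≤ k ∧ k ≤ 2 * M) → (∀ p ∈ ps, 1 ≤ p.1 → p.1 ≤ M) →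
    ∀ k ∈ (ps.foldl (fun sc p => if 1 ≤ p.1 then
        (sc.modify p.1 0 (· + p.2)).modify (2 * p.1) 0 (· + PySem.Int.floordiv p.2 2)
      else sc) sc).keys, 1 ≤ k ∧ k ≤ 2 * M := by
  intro ps
  induction ps with
  | nil => intro sc hsc _; simpa using hsc
  | cons p ps ih =>
    intro sc hsc hps
    simp only [List.foldl_cons]
    apply ih
    · intro k hk
      by_cases h1 : 1 ≤ p.1
      · rw [if_pos h1] at hk
        have hb := hps p (List.mem_cons_self ..) h1
        rw [PySem.Dict.keys_modify] at hk
        rcases (PySem.Dict.mem_keys_insert ..).mp hk with rfl | hk2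
        · omega
        · rw [PySem.Dict.keys_modify] at hk2
          rcases (PySem.Dict.mem_keys_insert ..).mp hk2 with rfl | hk3
          · omega
          · exact hsc k hk3
      · rw [if_neg h1] at hk
        exact hsc k hk
    · exact fun q hq => hps q (List.mem_cons_of_mem _ hq)

lemma pairStep_keys (freq : PySem.Dict Int Int) (M c : Int) (hc : c ≤ M) :
    ∀ (rest : List Int) (sc : PySem.Dict Int Int),
    (∀ k ∈ sc.keys, 1 ≤ k ∧ k ≤ 2 * M) → (∀ d ∈ rest, d ≤ M) →
    ∀ k ∈ (rest.foldl (fun sc d => if 1 ≤ c + d then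
        sc.modify (c + d) 0 (· + min (freq.getD c 0) (freq.getD d 0))
      else sc) sc).keys, 1 ≤ k ∧ k ≤ 2 * M := by
  intro rest
  induction rest with
  | nil => intro sc hsc _; simpa using hsc
  | cons d rest ih =>
    intro sc hsc hrest
    simp only [List.foldl_cons]
    apply ih
    · intro k hk
      by_cases h1 : 1 ≤ c + d
      · rw [if_pos h1, PySem.Dict.keys_modify] at hk
        rcases (PySem.Dict.mem_keys_insert ..).mp hk with rfl | hk2
        · have := hrest d (List.mem_cons_self ..); omega
        · exact hsc k hk2
      · rw [if_neg h1] at hk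
        exact hsc k hk
    · exact fun q hq => hrest q (List.mem_cons_of_mem _ hq)

lemma bPairs_keys (freq : PySem.Dict Int Int) (M : Int) :
    ∀ (L : List Int) (sc : PySem.Dict Int Int),
    (∀ k ∈ sc.keys, 1 ≤ k ∧ k ≤ 2 * M) → (∀ x ∈ L, x ≤ M) →
    ∀ k ∈ (bPairs freq L sc).keys, 1 ≤ k ∧ k ≤ 2 * M := by
  intro L
  induction L with
  | nil => intro sc hsc _; simpa [bPairs] using hsc
  | cons c rest ih =>
    intro sc hsc hL
    exact ih _ (pairStep_keys freq M c (hL c (List.mem_cons_self ..)) rest sc hsc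
        (fun d hd => hL d (List.mem_cons_of_mem _ hd)))
      (fun x hx => hL x (List.mem_cons_of_mem _ hx))

-- keys stay Nodup through every phase
lemma nodup_keys_modify' (d : PySem.Dict Int Int) (k : Int) (d0 : Int) (f : Int → Int)
    (h : d.keys.Nodup) : (d.modify k d0 f).keys.Nodup := by
  rw [PySem.Dict.keys_modify]
  exact PySem.Dict.nodup_keys_insert _ _ _ h

lemma phase1_nodup :
    ∀ (ps : List (Int × Int)) (sc : PySem.Dict Int Int), sc.keys.Nodup →
    (ps.foldl (fun sc p => if 1 ≤ p.1 then
        (sc.modify p.1 0 (· + p.2)).modify (2 * p.1) 0 (· + PySem.Int.floordiv p.2 2)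
      else sc) sc).keys.Nodup := by
  intro ps
  induction ps with
  | nil => intro sc h; simpa using h
  | cons p ps ih =>
    intro sc h
    simp only [List.foldl_cons]
    apply ih
    split_ifs
    · exact nodup_keys_modify' _ _ _ _ (nodup_keys_modify' _ _ _ _ h)
    · exact h

lemma pairStep_nodup (freq : PySem.Dict Int Int) (c : Int) :
    ∀ (rest : List Int) (sc : PySem.Dict Int Int), sc.keys.Nodup →
    (rest.foldl (fun sc d => if 1 ≤ c + d then
        sc.modify (c + d) 0 (· + min (freq.getD c 0) (freq.getD d 0))
      else sc) sc).keys.Nodup := by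
  intro rest
  induction rest with
  | nil => intro sc h; simpa using h
  | cons d rest ih =>
    intro sc h
    simp only [List.foldl_cons]
    apply ih
    split_ifs
    · exact nodup_keys_modify' _ _ _ _ h
    · exact h

lemma bPairs_nodup (freq : PySem.Dict Int Int) :
    ∀ (L : List Int) (sc : PySem.Dict Int Int), sc.keys.Nodup →
    (bPairs freq L sc).keys.Nodup := by
  intro L
  induction L with
  | nil => intro sc h; simpa [bPairs] using h
  | cons c rest ih => exact fun sc h => ih _ (pairStep_nodup freq c rest sc h)

lemma bCount_nonneg (xs : List Int) (t : Int) :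
    0 ≤ bCount (PySem.Dict.counter xs) (PySem.Dict.counter xs).keys t := by
  rw [bCount_decomp]
  have h1 : (0:Int) ≤ (PySem.Dict.counter xs).getD t 0 := by
    rw [PySem.Dict.getD_counter]; exact Int.natCast_nonneg _
  have h2 : (0:Int) ≤ (if PySem.Int.mod t 2 = 0 ∧
      (PySem.Dict.counter xs).contains (PySem.Int.floordiv t 2) = true then
      PySem.Int.floordiv ((PySem.Dict.counter xs).getD (PySem.Int.floordiv t 2) 0) 2 else 0) := by
    split_ifs
    · rw [PySem.Int.floordiv_eq_ediv_of_pos (by norm_num), PySem.Dict.getD_counter]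
      exact Int.ediv_nonneg (Int.natCast_nonneg _) (by norm_num)
    · exact le_refl 0
  have h3 : (0:Int) ≤ (((PySem.Dict.counter xs).keys.filter
      (fun c => decide (c ≠ 0 ∧ 2 * c < t) && (PySem.Dict.counter xs).contains (t - c))).map
      (fun c => min ((PySem.Dict.counter xs).getD c 0)
        ((PySem.Dict.counter xs).getD (t - c) 0))).sum := by
    apply List.sum_nonneg
    intro x hx
    obtain ⟨c, _, rfl⟩ := List.mem_map.mp hx
    apply le_min <;> (rw [PySem.Dict.getD_counter]; exact Int.natCast_nonneg _)
  omega

lemma sum_single_cond (K : List Int) (hnd : K.Nodup) (s : Int) (hs : 1 ≤ s) (v : Int → Int) :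
    ((K.filter (fun k => decide (1 ≤ k) && decide (k = s))).map v).sum =
    if s ∈ K then v s else 0 := by
  rw [← sum_map_if_filter]
  have hpw : ∀ k, (if (decide (1 ≤ k) && decide (k = s)) = true then v k else 0) =
      (fun k => if k = s then v k else 0) k := by
    intro k
    by_cases hk : k = s
    · subst hk; simp [hs]
    · simp [hk]
  rw [List.map_congr_left (fun k _ => hpw k), sum_map_single s v K hnd]

lemma sum_double_cond (K : List Int) (hnd : K.Nodup) (s : Int) (hs : 1 ≤ s) (v : Int → Int) :
    ((K.filter (fun k => decide (1 ≤ k) && decide (2 * k = s))).map v).sum =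
    if PySem.Int.mod s 2 = 0 ∧ (PySem.Int.floordiv s 2) ∈ K then
      v (PySem.Int.floordiv s 2) else 0 := by
  rw [← sum_map_if_filter]
  by_cases hdvd : (2:Int) ∣ s
  · obtain ⟨k, hk⟩ := hdvd
    have hfd : PySem.Int.floordiv s 2 = k := by
      rw [PySem.Int.floordiv_eq_ediv_of_pos (by norm_num), hk]; omega
    have hmod : PySem.Int.mod s 2 = 0 := (PySem.Int.mod_eq_zero_iff_dvd s 2).mpr ⟨k, hk⟩
    have hpw : ∀ c, (if (decide (1 ≤ c) && decide (2 * c = s)) = true then v c else 0) =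
        (fun c => if c = k then v c else 0) c := by
      intro c
      by_cases hc : c = k
      · subst hc; simp [(by omega : 2 * c = s), (by omega : 1 ≤ c)]
      · have : ¬ (2 * c = s) := by omega
        simp [hc, this]
    rw [List.map_congr_left (fun c _ => hpw c), sum_map_single k v K hnd, hfd, hmod]
    simp
  · have hmod : ¬ PySem.Int.mod s 2 = 0 :=
      fun hh => hdvd ((PySem.Int.mod_eq_zero_iff_dvd s 2).mp hh)
    rw [if_neg (fun hh => hmod hh.1)]
    apply List.sum_eq_zero
    intro x hx
    obtain ⟨c, _, rfl⟩ := List.mem_map.mp hx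
    rw [if_neg (fun hh => hdvd ⟨c, by
      rw [Bool.and_eq_true, decide_eq_true_eq, decide_eq_true_eq] at hh; omega⟩)]

-- ===== VERDICT (by name: the statement is the Claim_ definition above) =====
theorem max_equal_cost_packages_spec : Claim_equal_max_equal_cost_packages := by
  unfold Claim_equal_max_equal_cost_packages
  intro xs _ hpre
  unfold Spec_max_equal_cost_packages
  unfold Pre_max_equal_cost_packages at hpre
  obtain ⟨y, ys, rfl⟩ : ∃ y ys, xs = y :: ys := by
    cases xs with
    | nil => exact absurd rfl hpre
    | cons y ys => exact ⟨y, ys, rfl⟩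
  set xs := y :: ys with hxs
  set fr := PySem.Dict.counter xs with hfr
  set K := fr.keys with hK
  set L := PySem.List.sorted (K.filter (fun c => decide (c ≠ 0))) (fun x => x) false with hL
  set S1 := fr.items.foldl (fun sc p => if 1 ≤ p.1 then
      (sc.modify p.1 0 (· + p.2)).modify (2 * p.1) 0 (· + PySem.Int.floordiv p.2 2)
    else sc) PySem.Dict.empty with hS1
  set S := bPairs fr L S1 with hS
  have hB : max_equal_cost_packages_alt xs = PySem.List.maxD S.values (fun x => x) 0 := rfl
  set m := ys.foldl max y with hm
  have hmax : PySem.List.max? xs (fun x => x) = some m := PySem.List.max?_id_cons y ys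
  have hnd : K.Nodup := PySem.Dict.nodup_keys_counter xs
  have hmemK : ∀ u, u ∈ K ↔ u ∈ xs := by
    intro u
    rw [hK, hfr, PySem.Dict.keys_counter]
    exact PySem.Set.mem_ofList xs u
  have hbound : ∀ u ∈ K, u ≤ m :=
    fun u hu => PySem.List.max?_isMax hmax u ((hmemK u).mp hu)
  set g : Int → Int := fun t => bCount fr K t with hg
  have hgnn : ∀ t, 0 ≤ g t := fun t => bCount_nonneg xs t
  -- the A side: a running max of g over range(1, 2m+1)
  have hA : max_equal_cost_packages xs =
      (PySem.List.pyRange 1 (2 * m + 1)).foldl (fun acc t => max acc (g t)) 0 := by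
    unfold max_equal_cost_packages
    rw [hmax]
    simp only [Option.getD_some]
    exact PySem.List.foldl_congr_mem _ _ _ _ (fun acc t htmem =>
      congrArg (max acc) (aTarget_eq_bCount xs t (PySem.List.mem_pyRange_one.mp htmem).1))
  -- properties of the sorted nonzero key list L
  have hpermL : L.Perm (K.filter (fun c => decide (c ≠ 0))) := PySem.List.sorted_perm _ _ _
  have hndL : L.Nodup := hpermL.nodup_iff.mpr (hnd.filter _)
  have hpwlt : L.Pairwise (· < ·) := by
    have h1 : L.Pairwise (· ≤ ·) := PySem.List.sorted_pairwise _ _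
    have h2 : L.Pairwise (· ≠ ·) := hndL
    exact (h1.and h2).imp (fun h => lt_of_le_of_ne h.1 h.2)
  have hsubL : ∀ x ∈ L, fr.contains x = true ∧ x ≠ 0 := by
    intro x hx
    have := List.mem_filter.mp (hpermL.mem_iff.mp hx)
    exact ⟨(PySem.Dict.contains_iff_mem_keys fr x).mpr this.1,
      by simpa using this.2⟩
  have hclL : ∀ c ∈ L, ∀ x, fr.contains x = true → x ≠ 0 → c < x → x ∈ L := by
    intro c _ x hx hx0 _
    exact hpermL.mem_iff.mpr (List.mem_filter.mpr
      ⟨(PySem.Dict.contains_iff_mem_keys fr x).mp hx, by simpa using hx0⟩)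
  have hsubLm : ∀ x ∈ L, x ≤ m := by
    intro x hx
    exact hbound x ((PySem.Dict.contains_iff_mem_keys fr x).mp (hsubL x hx).1)
  -- the final table agrees with g on every slot ≥ 1
  have hSgetD : ∀ s, 1 ≤ s → S.getD s 0 = g s := by
    intro s hs
    rw [hS, bPairs_getD fr s hs L S1 hndL hpwlt hsubL hclL, hS1, phase1_getD]
    rw [hfr, PySem.Dict.items_counter]
    rw [List.filter_map, List.filter_map, List.map_map, List.map_map]
    have hc1 : ((fun p : Int × Int => decide (1 ≤ p.1) && decide (p.1 = s)) ∘
        (fun k : Int => (k, (List.count k xs : Int)))) =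
        (fun k : Int => decide (1 ≤ k) && decide (k = s)) := rfl
    have hc2 : ((fun p : Int × Int => decide (1 ≤ p.1) && decide (2 * p.1 = s)) ∘
        (fun k : Int => (k, (List.count k xs : Int)))) =
        (fun k : Int => decide (1 ≤ k) && decide (2 * k = s)) := rfl
    have hv1 : ((fun p : Int × Int => p.2) ∘ (fun k : Int => (k, (List.count k xs : Int)))) =
        (fun k : Int => (List.count k xs : Int)) := rfl
    have hv2 : ((fun p : Int × Int => PySem.Int.floordiv p.2 2) ∘
        (fun k : Int => (k, (List.count k xs : Int)))) =
        (fun k : Int => PySem.Int.floordiv (List.count k xs : Int) 2) := rfl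
    rw [hc1, hc2, hv1, hv2]
    have hndK' : (PySem.Set.ofList xs).Nodup := by
      rw [← PySem.Dict.keys_counter]; exact PySem.Dict.nodup_keys_counter xs
    rw [sum_single_cond _ hndK' s hs, sum_double_cond _ hndK' s hs]
    simp only [hg]
    rw [bCount_decomp]
    have e0 : PySem.Dict.empty.getD s (0:Int) = 0 := by
      simp
    have e1 : (if s ∈ PySem.Set.ofList xs then (List.count s xs : Int) else 0) =
        fr.getD s 0 := by
      rw [hfr, PySem.Dict.getD_counter]
      split_ifs with h
      · rfl
      · rw [List.count_eq_zero.mpr (fun hh => h ((PySem.Set.mem_ofList xs s).mpr hh))]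
        rfl
    have e2 : (if PySem.Int.mod s 2 = 0 ∧ PySem.Int.floordiv s 2 ∈ PySem.Set.ofList xs then
        PySem.Int.floordiv (List.count (PySem.Int.floordiv s 2) xs : Int) 2 else 0) =
        (if PySem.Int.mod s 2 = 0 ∧ fr.contains (PySem.Int.floordiv s 2) = true then
        PySem.Int.floordiv (fr.getD (PySem.Int.floordiv s 2) 0) 2 else 0) := by
      have hmem2 : (PySem.Int.floordiv s 2 ∈ PySem.Set.ofList xs) ↔
          fr.contains (PySem.Int.floordiv s 2) = true := by
        rw [hfr, PySem.Dict.contains_iff_mem_keys, PySem.Dict.keys_counter]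
      rw [hfr, PySem.Dict.getD_counter]
      simp only [hmem2]
      rfl
    rw [e0, e1, e2]
    -- pair sums over L and over K agree
    have hps : ((L.filter (fun c => decide (c ≠ 0 ∧ 2 * c < s) && fr.contains (s - c))).map
          (fun c => min (fr.getD c 0) (fr.getD (s - c) 0))).sum =
        ((K.filter (fun c => decide (c ≠ 0 ∧ 2 * c < s) && fr.contains (s - c))).map
          (fun c => min (fr.getD c 0) (fr.getD (s - c) 0))).sum := by
      have hp := (hpermL.filter (fun c => decide (c ≠ 0 ∧ 2 * c < s) && fr.contains (s - c))).map
        (fun c => min (fr.getD c 0) (fr.getD (s - c) 0))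
      rw [hp.sum_eq]
      rw [List.filter_filter]
      refine congrArg List.sum (congrArg _ (List.filter_congr ?_))
      intro c _
      by_cases hc0 : c = 0
      · simp [hc0]
      · simp [hc0]
    rw [hps]
    ring
  have hSkeys : ∀ k ∈ S.keys, 1 ≤ k ∧ k ≤ 2 * m := by
    intro k hk
    refine bPairs_keys fr m L S1 ?_ hsubLm k hk
    refine phase1_keys m fr.items PySem.Dict.empty ?_ ?_
    · intro q hq
      simp [PySem.Dict.keys_empty] at hq
    · intro p hp h1
      exact hbound p.1 (by rw [hK]; exact PySem.Dict.mem_keys_of_mem_items fr hp)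
  have hSnodup : S.keys.Nodup := by
    refine bPairs_nodup fr L S1 (phase1_nodup fr.items PySem.Dict.empty ?_)
    simp [PySem.Dict.keys_empty]
  have hvals : S.values = S.keys.map (fun k => S.getD k 0) :=
    PySem.Dict.values_eq_map_keys S hSnodup 0
  rw [hA, hB]
  -- compare the two running maxima
  cases hks : S.keys with
  | nil =>
    have hv : S.values = [] := by rw [hvals, hks]; rfl
    rw [hv]
    have hright : PySem.List.maxD ([] : List Int) (fun x => x) 0 = 0 := rfl
    rw [hright]
    apply le_antisymm
    · apply foldl_max_le_of g 0 _ 0 (le_refl 0)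
      intro t htr
      have ht1 : 1 ≤ t := (PySem.List.mem_pyRange_one.mp htr).1
      have : S.getD t 0 = 0 := by
        apply PySem.Dict.getD_of_not_contains
        cases hc : S.contains t
        · rfl
        · exact absurd ((PySem.Dict.contains_iff_mem_keys S t).mp hc) (by rw [hks]; simp)
      rw [← hSgetD t ht1, this]
    · exact (PySem.List.le_foldl_max_int _ g 0).1
  | cons k0 kt =>
    have hv : S.values = S.getD k0 0 :: kt.map (fun k => S.getD k 0) := by
      rw [hvals, hks]; rfl
    rw [hv]
    have hmaxD : PySem.List.maxD (S.getD k0 0 :: kt.map (fun k => S.getD k 0)) (fun x => x) 0 =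
        (kt.map (fun k => S.getD k 0)).foldl max (S.getD k0 0) := by
      unfold PySem.List.maxD
      rw [PySem.List.max?_id_cons]
      rfl
    rw [hmaxD]
    set B' := (kt.map (fun k => S.getD k 0)).foldl max (S.getD k0 0) with hB'
    have hk0 : k0 ∈ S.keys := by rw [hks]; exact List.mem_cons_self ..
    have hBlow : ∀ x ∈ S.getD k0 0 :: kt.map (fun k => S.getD k 0), x ≤ B' := by
      intro x hx
      rcases List.mem_cons.mp hx with rfl | hx2
      · exact (PySem.List.le_foldl_max _ _).1
      · exact (PySem.List.le_foldl_max _ _).2 x hx2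
    have hB0 : 0 ≤ B' := by
      have h1 := hBlow (S.getD k0 0) (List.mem_cons_self ..)
      have h2 := hSgetD k0 (hSkeys k0 hk0).1
      have := hgnn k0
      omega
    apply le_antisymm
    · apply foldl_max_le_of g B' _ 0 hB0
      intro t htr
      have ht1 : 1 ≤ t := (PySem.List.mem_pyRange_one.mp htr).1
      by_cases htk : t ∈ S.keys
      · have : S.getD t 0 ∈ S.getD k0 0 :: kt.map (fun k => S.getD k 0) := by
          rw [← hv, hvals]
          exact List.mem_map.mpr ⟨t, htk, rfl⟩
        rw [← hSgetD t ht1]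
        exact hBlow _ this
      · have hz : S.getD t 0 = 0 := by
          apply PySem.Dict.getD_of_not_contains
          cases hc : S.contains t
          · rfl
          · exact absurd ((PySem.Dict.contains_iff_mem_keys S t).mp hc) htk
        rw [← hSgetD t ht1, hz]
        exact hB0
    · apply foldl_max_le_of (fun x => x) _ (kt.map (fun k => S.getD k 0)) (S.getD k0 0)
      · have hk01 := hSkeys k0 hk0
        rw [hSgetD k0 hk01.1]
        exact (PySem.List.le_foldl_max_int _ g 0).2 k0
          (PySem.List.mem_pyRange_one.mpr ⟨hk01.1, by omega⟩)
      · intro x hx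
        obtain ⟨k, hkmem, rfl⟩ := List.mem_map.mp hx
        have hkb := hSkeys k (by rw [hks]; exact List.mem_cons_of_mem _ hkmem)
        rw [hSgetD k hkb.1]
        exact (PySem.List.le_foldl_max_int _ g 0).2 k
          (PySem.List.mem_pyRange_one.mpr ⟨hkb.1, by omega⟩)
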